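-- pv_equiv track=rewrite | github.com/manwar/perlweeklychallenge-club | challenge-248/lubos-kolouch/python/ch-2.py | construct_matrix
-- ===== SOURCE A (Python) =====
-- def construct_matrix(a: list[list[int]]) -> list[list[int]]:
--     n, m = len(a), len(a[0])
--     b = [
--         [
--             sum(a[i + di][j + dj] for di in range(2) for dj in range(2))
--             for j in range(m - 1)
--         ]
--         for i in range(n - 1)
--     ]
--     return b
-- ===== SOURCE B (Python) =====
-- def construct_matrix(a: list[list[int]]) -> list[list[int]]:
--     m = len(a[0])
--     h = [[x + y for x, y in zip(row[:m], row[1:m])] for row in a]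
--     return [[x + y for x, y in zip(r1, r2)] for r1, r2 in zip(h, h[1:])]
-- ===== Notes on version B (the rewrite author's own statement) =====
-- stated objective: faster
-- what changed: Replaces the flat per-cell 4-term generator-expression sum over index ranges by a separable two-pass computation: a horizontal-pair table built with zip of adjacent slices, then a vertical zip-combine of adjacent table rows; no per-cell generator or index arithmetic remains.
import Mathlib
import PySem

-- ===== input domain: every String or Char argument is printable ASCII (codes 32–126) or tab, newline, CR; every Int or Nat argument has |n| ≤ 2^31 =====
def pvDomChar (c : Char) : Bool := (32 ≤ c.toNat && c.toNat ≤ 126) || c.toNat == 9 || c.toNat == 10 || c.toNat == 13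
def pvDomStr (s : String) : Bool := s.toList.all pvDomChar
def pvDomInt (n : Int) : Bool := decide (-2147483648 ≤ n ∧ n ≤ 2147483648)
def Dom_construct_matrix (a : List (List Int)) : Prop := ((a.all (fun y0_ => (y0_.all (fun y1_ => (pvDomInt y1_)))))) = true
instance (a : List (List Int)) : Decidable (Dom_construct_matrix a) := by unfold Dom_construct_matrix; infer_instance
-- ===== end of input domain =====

-- B computes the same 2x2 sliding-window sums by a separable two-pass (horizontal-pair
-- table via zip of adjacent slices, then vertical zip-combine) instead of A's flat
-- per-cell 4-term indexed generator sum; same asymptotic cost, measurably faster by a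
-- constant factor (no per-cell generator object or repeated indexing).

-- ===== PORT A =====
-- literal transliteration of A: nested comprehensions over ranges, inner 4-term sum
def construct_matrix (a : List (List Int)) : List (List Int) :=
  let n : Int := a.length
  let m : Int := ((PySem.List.pyGet? a 0).getD []).length
  (PySem.List.pyRange 0 (n - 1) 1).map (fun i =>
    (PySem.List.pyRange 0 (m - 1) 1).map (fun j =>
      ((PySem.List.pyRange 0 2 1).map (fun di =>
        ((PySem.List.pyRange 0 2 1).map (fun dj =>
          PySem.List.pyGetD (PySem.List.pyGetD a (i + di) []) (j + dj) 0)).sum)).sum))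

-- ===== PORT B =====
-- literal transliteration of B: zip of adjacent slices, then zip of adjacent rows
def construct_matrix_alt (a : List (List Int)) : List (List Int) :=
  let m : Int := ((PySem.List.pyGet? a 0).getD []).length
  let h := a.map (fun row =>
    ((PySem.List.slice row none (some m)).zip (PySem.List.slice row (some 1) (some m))).map
      (fun p => p.1 + p.2))
  (h.zip (PySem.List.slice h (some 1) none)).map (fun p =>
    (p.1.zip p.2).map (fun q => q.1 + q.2))

-- ===== PRECONDITION & SPEC =====
-- Pre_ excludes exactly the inputs where A raises: the empty list (a[0] is IndexError),
-- and matrices whose first row has ≥ 2 columns while some row is shorter than it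
-- (A's 2x2 window indexing then raises IndexError).
def Pre_construct_matrix (a : List (List Int)) : Prop :=
  a ≠ [] ∧ ((a.headD []).length ≤ 1 ∨ ∀ row ∈ a, (a.headD []).length ≤ row.length)
instance (a : List (List Int)) : Decidable (Pre_construct_matrix a) := by
  unfold Pre_construct_matrix; infer_instance

def pvWitness_construct_matrix : List (List Int) := [[1, 2, 3], [4, 5, 6], [7, 8, 9]]

def Spec_construct_matrix (a : List (List Int)) (out : List (List Int)) : Prop := out = construct_matrix_alt a
instance (a : List (List Int)) (out : List (List Int)) : Decidable (Spec_construct_matrix a out) := by unfold Spec_construct_matrix; infer_instance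

-- ===== CLAIM (what is proved, stated in full; the proofs are below) =====
def Claim_equal_construct_matrix : Prop := ∀ (a : List (List Int)), Dom_construct_matrix a → Pre_construct_matrix a → Spec_construct_matrix a (construct_matrix a)

-- ===== LEMMAS AND PROOFS =====

-- canonical form both ports are reduced to
def pvCanon (a : List (List Int)) (m : Nat) : List (List Int) :=
  (List.range (a.length - 1)).map (fun i => (List.range (m - 1)).map (fun j =>
    ((a.getD i []).getD j 0 + (a.getD i []).getD (j+1) 0)
      + ((a.getD (i+1) []).getD j 0 + (a.getD (i+1) []).getD (j+1) 0)))

theorem pyRange_zero_nat (N : Nat) :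
    PySem.List.pyRange 0 (N:Int) 1 = (List.range N).map (fun (k : Nat) => (k:Int)) := by
  rw [PySem.List.pyRange_zero_natCast]

theorem pyRange_pred_nat (M : Nat) :
    PySem.List.pyRange 0 ((M:Int) - 1) 1 = (List.range (M-1)).map (fun (k : Nat) => (k:Int)) := by
  cases M with
  | zero => decide
  | succ k =>
      have h1 : ((k+1:Nat):Int) - 1 = (k:Int) := by push_cast; ring
      rw [h1, pyRange_zero_nat]; rfl

theorem A_canon (r : List Int) (t : List (List Int)) :
    construct_matrix (r :: t) = pvCanon (r :: t) r.length := by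
  have h2 : PySem.List.pyRange 0 2 1 = [0, 1] := by decide
  have hn : (((r :: t).length : Int)) - 1 = ((t.length : Nat) : Int) := by simp
  simp only [construct_matrix, PySem.List.pyGet?_zero_cons, Option.getD_some]
  rw [hn, pyRange_zero_nat, pyRange_pred_nat, h2]
  simp only [pvCanon, List.length_cons, Nat.add_sub_cancel, List.map_map]
  apply List.map_congr_left
  intro i _
  apply List.map_congr_left
  intro j _
  have c1 : ∀ (k : Nat), ((k:Int) + 1) = (((k+1 : Nat)):Int) := by intro k; push_cast; ring
  simp only [Function.comp, List.map_cons, List.map_nil, List.sum_cons, List.sum_nil,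
    add_zero, c1, PySem.List.pyGetD_natCast]

theorem g_eq (row : List Int) (M : Nat) (h : M ≤ 1 ∨ M ≤ row.length) :
    ((PySem.List.slice row none (some (M:Int))).zip
        (PySem.List.slice row (some 1) (some (M:Int)))).map (fun p => p.1 + p.2)
      = (List.range (M-1)).map (fun j => row.getD j 0 + row.getD (j+1) 0) := by
  rw [PySem.List.slice_to_natCast, show (1:Int) = ((1:Nat):Int) from rfl,
    PySem.List.slice_natCast]
  apply List.ext_getElem
  · simp only [List.length_map, List.length_zip, List.length_take, List.length_drop,
      List.length_range]
    omega
  · intro j hj hj'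
    simp only [List.length_map, List.length_zip, List.length_take, List.length_drop] at hj
    have hM : M ≤ row.length := by rcases h with h | h <;> omega
    have hjr : j + 1 < row.length := by omega
    simp only [List.getElem_map, List.getElem_zip, List.getElem_take, List.getElem_drop,
      List.getElem_range]
    rw [List.getD_eq_getElem row 0 (by omega), List.getD_eq_getElem row 0 hjr]
    have h1j : row[1 + j] = row[j + 1] := by congr 1; omega
    rw [h1j]

theorem B_canon (r : List Int) (t : List (List Int))
    (h : r.length ≤ 1 ∨ ∀ row ∈ r :: t, r.length ≤ row.length) :
    construct_matrix_alt (r :: t) = pvCanon (r :: t) r.length := by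
  simp only [construct_matrix_alt, PySem.List.pyGet?_zero_cons, Option.getD_some,
    PySem.List.slice_from_one]
  have hg : ∀ row ∈ r :: t,
      ((PySem.List.slice row none (some ((r.length:Nat):Int))).zip
        (PySem.List.slice row (some 1) (some ((r.length:Nat):Int)))).map (fun p => p.1 + p.2)
      = (List.range (r.length-1)).map (fun j => row.getD j 0 + row.getD (j+1) 0) := by
    intro row hrow
    apply g_eq
    rcases h with h | h
    · exact Or.inl h
    · exact Or.inr (h row hrow)
  apply List.ext_getElem
  · simp [pvCanon, List.length_zip]
  · intro i hi hi'
    simp only [List.length_map, List.length_zip, List.length_tail] at hi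
    have hin : i + 1 < (r :: t).length := by simp at hi ⊢; omega
    simp only [List.getElem_map, List.getElem_zip, pvCanon, List.getElem_range]
    simp only [List.getElem_tail, List.getElem_map]
    rw [hg ((r :: t)[i]) (List.getElem_mem _), hg ((r :: t)[i+1]) (List.getElem_mem _)]
    rw [List.zip_map', List.map_map]
    apply List.map_congr_left
    intro j _
    rw [List.getD_eq_getElem (r :: t) [] (by omega),
      List.getD_eq_getElem (r :: t) [] hin]
    rfl

theorem ports_eq (a : List (List Int)) (h : Pre_construct_matrix a) :
    construct_matrix a = construct_matrix_alt a := by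
  obtain ⟨ha, hrows⟩ := h
  obtain ⟨r, t, rfl⟩ := List.exists_cons_of_ne_nil ha
  simp only [List.headD_cons] at hrows
  rw [A_canon, B_canon r t hrows]

-- ===== VERDICT (by name: the statement is the Claim_ definition above) =====
theorem construct_matrix_spec : Claim_equal_construct_matrix := by
  intro a _ hpre
  unfold Spec_construct_matrix
  exact ports_eq a hpre
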